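-- pv_equiv track=rewrite | github.com/yli110-stat697/Advent-of-Code | D3/part2.py | GetHouses
-- ===== SOURCE A (Python) =====
-- def GetHouses(directions):
--     i = 0
--     j = 0
--     position = (i, j)
--     positions = set()
--     positions.add(position)
--     for direction in directions:
--         if direction == '>':
--             j += 1
--         elif direction == '<':
--             j -= 1
--         elif direction == 'v':
--             i += 1
--         elif direction == '^':
--             i -= 1
--         else:
--             raise Exception("Directions not clear!")
--         position = (i,j)
--         positions.add(position)
--     return positions
-- ===== SOURCE B (Python) =====
-- def _prefix_sums(deltas):
--     total = 0
--     out = [0]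
--     for d in deltas:
--         total += d
--         out.append(total)
--     return out
--
--
-- def GetHouses(directions):
--     # staged passes: validate, then decompose into two independent axis
--     # prefix-sum passes, then zip the coordinate tracks together
--     if any(c not in '><v^' for c in directions):
--         raise Exception("Directions not clear!")
--     rows = _prefix_sums(1 if c == 'v' else -1 if c == '^' else 0 for c in directions)
--     cols = _prefix_sums(1 if c == '>' else -1 if c == '<' else 0 for c in directions)
--     return set(zip(rows, cols))
-- ===== Notes on version B (the rewrite author's own statement) =====
-- stated objective: alternative
-- what changed: B replaces A's single stateful pass (position updated and added to a set per step) by staged passes: a validation pass, two independent per-axis prefix-sum passes, and a final zip of the two coordinate tracks deduplicated with set().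
import Mathlib
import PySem

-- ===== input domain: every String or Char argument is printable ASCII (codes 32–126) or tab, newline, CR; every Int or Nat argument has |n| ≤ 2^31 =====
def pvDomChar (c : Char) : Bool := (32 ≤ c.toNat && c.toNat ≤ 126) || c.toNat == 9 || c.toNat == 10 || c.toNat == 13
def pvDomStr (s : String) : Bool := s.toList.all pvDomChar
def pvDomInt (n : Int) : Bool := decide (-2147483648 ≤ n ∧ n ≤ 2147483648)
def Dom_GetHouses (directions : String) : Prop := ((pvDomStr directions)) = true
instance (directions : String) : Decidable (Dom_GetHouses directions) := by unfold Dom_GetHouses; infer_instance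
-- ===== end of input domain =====

-- B replaces A's single stateful pass by staged passes: validation, two independent per-axis
-- prefix-sum passes, then a zip of the two tracks deduplicated once (objective: alternative).

-- ===== PORT A =====
-- one loop step of A; 'none' = the raise-Exception branch of the Python
def aStep (st : Option (Int × Int × List (Int × Int))) (c : Char) :
    Option (Int × Int × List (Int × Int)) :=
  st.bind fun (i, j, s) =>
    if c = '>' then some (i, j + 1, PySem.Set.add s (i, j + 1))
    else if c = '<' then some (i, j - 1, PySem.Set.add s (i, j - 1))
    else if c = 'v' then some (i + 1, j, PySem.Set.add s (i + 1, j))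
    else if c = '^' then some (i - 1, j, PySem.Set.add s (i - 1, j))
    else none

def GetHouses (directions : String) : List (Int × Int) :=
  match directions.toList.foldl aStep
      (some (0, 0, PySem.Set.add PySem.Set.empty ((0 : Int), (0 : Int)))) with
  | some (_, _, positions) => positions
  | none => []  -- unreachable under Pre_GetHouses (A raises here)

-- ===== PORT B =====
-- port of _prefix_sums: running total, output list starting with 0
def bPrefixSums (deltas : List Int) : List Int :=
  (deltas.foldl (fun (st : Int × List Int) d => (st.1 + d, st.2 ++ [st.1 + d])) (0, [0])).2

def GetHouses_alt (directions : String) : List (Int × Int) :=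
  if directions.toList.any (fun c => !('>' == c || '<' == c || 'v' == c || '^' == c)) then
    []  -- unreachable under Pre_GetHouses (B raises here)
  else
    let rows := bPrefixSums (directions.toList.map fun c =>
      if c = 'v' then 1 else if c = '^' then -1 else 0)
    let cols := bPrefixSums (directions.toList.map fun c =>
      if c = '>' then 1 else if c = '<' then -1 else 0)
    PySem.Set.ofList (rows.zip cols)

-- ===== PRECONDITION & SPEC =====
-- Pre_ excludes exactly the inputs containing a character other than > < v ^, on which A raises
-- an Exception (and B raises the same).
def Pre_GetHouses (directions : String) : Prop :=
  directions.toList.all (fun c => c == '>' || c == '<' || c == 'v' || c == '^') = true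
instance (directions : String) : Decidable (Pre_GetHouses directions) := by
  unfold Pre_GetHouses; infer_instance

def pvWitness_GetHouses : String := ">>v^<"

def Spec_GetHouses (directions : String) (out : List (Int × Int)) : Prop := out = GetHouses_alt directions
instance (directions : String) (out : List (Int × Int)) : Decidable (Spec_GetHouses directions out) := by unfold Spec_GetHouses; infer_instance

-- ===== CLAIM (what is proved, stated in full; the proofs are below) =====
def Claim_equal_GetHouses : Prop := ∀ (directions : String), Dom_GetHouses directions → Pre_GetHouses directions → Spec_GetHouses directions (GetHouses directions)

-- ===== LEMMAS AND PROOFS =====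

-- per-character deltas and the common trail of visited positions (excluding the start)
def dRow (c : Char) : Int := if c = 'v' then 1 else if c = '^' then -1 else 0
def dCol (c : Char) : Int := if c = '>' then 1 else if c = '<' then -1 else 0

def trail (i j : Int) : List Char → List (Int × Int)
  | [] => []
  | c :: cs => (i + dRow c, j + dCol c) :: trail (i + dRow c) (j + dCol c) cs

def validC (c : Char) : Bool := c == '>' || c == '<' || c == 'v' || c == '^'

-- A's fold, characterised: from any state it succeeds on a valid suffix and adds the trail
lemma keyA (cs : List Char) (h : cs.all validC = true) :
    ∀ (i j : Int) (s : List (Int × Int)),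
      cs.foldl aStep (some (i, j, s)) =
        some (i + ((cs.map dRow).sum), j + ((cs.map dCol).sum),
          (trail i j cs).foldl PySem.Set.add s) := by
  induction cs with
  | nil => intro i j s; simp [trail]
  | cons c cs ih =>
    intro i j s
    simp only [List.all_cons, Bool.and_eq_true] at h
    obtain ⟨hc, hcs⟩ := h
    have hstep : aStep (some (i, j, s)) c =
        some (i + dRow c, j + dCol c, PySem.Set.add s (i + dRow c, j + dCol c)) := by
      simp only [validC, Bool.or_eq_true, beq_iff_eq] at hc
      rcases hc with ((h1 | h1) | h1) | h1 <;> subst h1 <;>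
        simp [aStep, dRow, dCol, sub_eq_add_neg]
    rw [List.foldl_cons, hstep, ih hcs]
    simp [trail, List.foldl_cons]
    constructor <;> ring

-- B's prefix-sum fold, characterised via the running-prefix list
def prefList (a : Int) : List Int → List Int
  | [] => []
  | d :: ds => (a + d) :: prefList (a + d) ds

lemma bPrefix_aux (ds : List Int) : ∀ (a : Int) (out : List Int),
    (ds.foldl (fun (st : Int × List Int) d => (st.1 + d, st.2 ++ [st.1 + d])) (a, out)).2
      = out ++ prefList a ds := by
  induction ds with
  | nil => intro a out; simp [prefList]
  | cons d ds ih => intro a out; simp [List.foldl_cons, ih, prefList]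

lemma bPrefixSums_eq (ds : List Int) : bPrefixSums ds = 0 :: prefList 0 ds := by
  simpa [bPrefixSums] using bPrefix_aux ds 0 [0]

-- zipping the two per-axis prefix lists gives exactly the trail
lemma zip_pref (cs : List Char) : ∀ (i j : Int),
    (prefList i (cs.map dRow)).zip (prefList j (cs.map dCol)) = trail i j cs := by
  induction cs with
  | nil => intro i j; simp [prefList, trail]
  | cons c cs ih => intro i j; simp [prefList, trail, List.zip_cons_cons, ih]

-- folding Set.add over a list extends ofList
lemma foldl_add_ofList (l : List (Int × Int)) : ∀ (t : List (Int × Int)),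
    l.foldl PySem.Set.add (PySem.Set.ofList t) = PySem.Set.ofList (t ++ l) := by
  induction l with
  | nil => intro t; simp
  | cons x l ih =>
    intro t
    have : PySem.Set.add (PySem.Set.ofList t) x = PySem.Set.ofList (t ++ [x]) := by
      simp [PySem.Set.ofList_append_singleton]
    rw [List.foldl_cons, this, ih]
    simp

-- ===== VERDICT (by name: the statement is the Claim_ definition above) =====
theorem GetHouses_spec : Claim_equal_GetHouses := by
  intro d _ hpre
  unfold Spec_GetHouses GetHouses GetHouses_alt
  have hval : d.toList.all validC = true := hpre
  have hany : d.toList.any (fun c => !('>' == c || '<' == c || 'v' == c || '^' == c)) = false := by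
    simp only [List.any_eq_false]
    intro c hc
    have := List.all_eq_true.mp hval c hc
    simp only [validC, Bool.or_eq_true, beq_iff_eq] at this
    rcases this with ((h1 | h1) | h1) | h1 <;> subst h1 <;> decide
  rw [hany]
  simp only [Bool.false_eq_true, if_false]
  rw [keyA d.toList hval 0 0 _]
  show (trail 0 0 d.toList).foldl PySem.Set.add (PySem.Set.ofList [((0:Int),(0:Int))]) = _
  rw [foldl_add_ofList]
  rw [show (d.toList.map fun c => if c = 'v' then (1:Int) else if c = '^' then -1 else 0) = d.toList.map dRow from rfl]
  rw [show (d.toList.map fun c => if c = '>' then (1:Int) else if c = '<' then -1 else 0) = d.toList.map dCol from rfl]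
  rw [bPrefixSums_eq, bPrefixSums_eq]
  rw [List.zip_cons_cons, zip_pref]
  rfl
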